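-- pv_equiv track=rewrite | github.com/akilmarshall/advent-of-code | 2021/08/main.py | get_distinct
-- ===== SOURCE A (Python) =====
-- from typing import List
--
-- def get_distinct(numbers: List[str]):
--     one, four, seven, eight = '', '', '', ''
--     for n in numbers:
--         l = len(n)
--         if l == 2:
--             one = n
--         if l == 3:
--             seven = n
--         if l == 4:
--             four = n
--         if l == 7:
--             eight = n
--     return one, four, seven, eight
-- ===== SOURCE B (Python) =====
-- def get_distinct(numbers):
--     def pick(length):
--         for n in reversed(numbers):
--             if len(n) == length:
--                 return n
--         return ''
--     return pick(2), pick(4), pick(3), pick(7)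
-- ===== Notes on version B (the rewrite author's own statement) =====
-- stated objective: faster
-- what changed: Replaces A's single forward pass accumulating four last-wins variables by four independent backward searches with early exit: the first length-match scanning from the end is exactly A's final overwrite, '' if none; each search stops as soon as it finds a match instead of scanning the whole list.
import Mathlib
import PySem

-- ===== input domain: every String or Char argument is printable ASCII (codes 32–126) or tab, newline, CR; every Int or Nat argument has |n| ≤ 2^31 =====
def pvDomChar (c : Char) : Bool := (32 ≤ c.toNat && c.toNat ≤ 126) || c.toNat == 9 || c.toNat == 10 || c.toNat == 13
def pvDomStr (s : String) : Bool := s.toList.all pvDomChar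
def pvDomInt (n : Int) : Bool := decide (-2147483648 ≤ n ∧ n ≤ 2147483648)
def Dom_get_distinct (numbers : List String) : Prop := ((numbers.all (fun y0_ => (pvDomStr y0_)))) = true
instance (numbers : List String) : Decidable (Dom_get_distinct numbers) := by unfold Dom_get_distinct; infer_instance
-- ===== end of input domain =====

-- B replaces A's single forward accumulating pass by four backward first-match searches with early exit; objective: alternative.

-- ===== PORT A =====
def get_distinct (numbers : List String) : String × String × String × String :=
  numbers.foldl (fun (st : String × String × String × String) n =>
    let (one, four, seven, eight) := st
    let l := PySem.Str.len n
    let one := if l == 2 then n else one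
    let seven := if l == 3 then n else seven
    let four := if l == 4 then n else four
    let eight := if l == 7 then n else eight
    (one, four, seven, eight)) ("", "", "", "")

-- ===== PORT B =====
-- port of Source B's `pick` loop over reversed(numbers), with the fallback '' as default d
def pickD (k : Int) (d : String) : List String → String
  | [] => d
  | n :: t => if PySem.Str.len n == k then n else pickD k d t

def get_distinct_alt (numbers : List String) : String × String × String × String :=
  let r := numbers.reverse
  (pickD 2 "" r, pickD 4 "" r, pickD 3 "" r, pickD 7 "" r)

-- ===== PRECONDITION & SPEC =====
def Spec_get_distinct (numbers : List String) (out : String × String × String × String) : Prop := out = get_distinct_alt numbers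
instance (numbers : List String) (out : String × String × String × String) : Decidable (Spec_get_distinct numbers out) := by unfold Spec_get_distinct; infer_instance

-- ===== CLAIM (what is proved, stated in full; the proofs are below) =====
def Claim_equal_get_distinct : Prop := ∀ (numbers : List String), Dom_get_distinct numbers → Spec_get_distinct numbers (get_distinct numbers)

-- ===== LEMMAS AND PROOFS =====

theorem pickD_append_singleton (k : Int) (d : String) (xs : List String) (n : String) :
    pickD k d (xs ++ [n]) = pickD k (if PySem.Str.len n == k then n else d) xs := by
  induction xs with
  | nil => rfl
  | cons x t ih => simp only [List.cons_append, pickD, ih]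

theorem get_distinct_loop (l : List String) (one four seven eight : String) :
    l.foldl (fun (st : String × String × String × String) n =>
      let (one, four, seven, eight) := st
      let ln := PySem.Str.len n
      let one := if ln == 2 then n else one
      let seven := if ln == 3 then n else seven
      let four := if ln == 4 then n else four
      let eight := if ln == 7 then n else eight
      (one, four, seven, eight)) (one, four, seven, eight)
    = (pickD 2 one l.reverse, pickD 4 four l.reverse, pickD 3 seven l.reverse, pickD 7 eight l.reverse) := by
  induction l generalizing one four seven eight with
  | nil => rfl
  | cons n t ih =>
    simp only [List.foldl_cons, List.reverse_cons, pickD_append_singleton]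
    exact ih _ _ _ _

-- ===== VERDICT (by name: the statement is the Claim_ definition above) =====
theorem get_distinct_spec : Claim_equal_get_distinct := by
  intro numbers _
  show get_distinct numbers = get_distinct_alt numbers
  simpa [get_distinct, get_distinct_alt] using get_distinct_loop numbers "" "" "" ""
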